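-- pv_equiv track=rewrite | github.com/shreyamaria2002/Ai-Music-and-Lyrics | aligning.py | align_notes_with_lyrics
-- ===== SOURCE A (Python) =====
-- def note_number_to_name(note_number):
--     note_names = ['C', 'C#', 'D', 'D#', 'E', 'F', 'F#', 'G', 'G#', 'A', 'A#', 'B']
--     octave = (note_number // 12) - 1
--     note = note_number % 12
--     return f"{note_names[note]}{octave}"
--
-- def align_notes_with_lyrics(lyrics, notes):
--     aligned_lyrics = []
--     note_index = 0
--     for line in lyrics.split('\n'):
--         line_notes = []
--         words = line.split()
--         for word in words:
--             if word.isalpha():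
--                 if note_index < len(notes):
--                     line_notes.append(note_number_to_name(notes[note_index][1]))
--                     note_index += 1
--                 else:
--                     line_notes.append(None)
--             else:
--                 for _ in range(len(word)):
--                     if note_index < len(notes):
--                         line_notes.append(note_number_to_name(notes[note_index][1]))
--                         note_index += 1
--                     else:
--                         line_notes.append(None)
--         aligned_lyrics.append((line, line_notes))
--     return aligned_lyrics
-- ===== SOURCE B (Python) =====
-- def note_number_to_name(note_number):
--     note_names = ['C', 'C#', 'D', 'D#', 'E', 'F', 'F#', 'G', 'G#', 'A', 'A#', 'B']
--     octave = (note_number // 12) - 1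
--     note = note_number % 12
--     return f"{note_names[note]}{octave}"
--
-- def align_notes_with_lyrics(lyrics, notes):
--     # Per line, compute arithmetically how many notes it needs (1 per alphabetic
--     # word, len(word) otherwise), slice that many off the remaining notes, and
--     # pad with None when the notes run out.
--     rem = list(notes)
--     aligned = []
--     for line in lyrics.split('\n'):
--         need = sum(1 if w.isalpha() else len(w) for w in line.split())
--         used = rem[:need]
--         line_notes = [note_number_to_name(p[1]) for p in used] + [None] * (need - len(used))
--         rem = rem[need:]
--         aligned.append((line, line_notes))
--     return aligned
-- ===== Notes on version B (the rewrite author's own statement) =====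
-- stated objective: alternative
-- what changed: Replaces A's per-note running index with duplicated bound checks by a per-line arithmetic count (sum of word costs) followed by one slice of the remaining notes plus None padding.
import Mathlib
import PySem

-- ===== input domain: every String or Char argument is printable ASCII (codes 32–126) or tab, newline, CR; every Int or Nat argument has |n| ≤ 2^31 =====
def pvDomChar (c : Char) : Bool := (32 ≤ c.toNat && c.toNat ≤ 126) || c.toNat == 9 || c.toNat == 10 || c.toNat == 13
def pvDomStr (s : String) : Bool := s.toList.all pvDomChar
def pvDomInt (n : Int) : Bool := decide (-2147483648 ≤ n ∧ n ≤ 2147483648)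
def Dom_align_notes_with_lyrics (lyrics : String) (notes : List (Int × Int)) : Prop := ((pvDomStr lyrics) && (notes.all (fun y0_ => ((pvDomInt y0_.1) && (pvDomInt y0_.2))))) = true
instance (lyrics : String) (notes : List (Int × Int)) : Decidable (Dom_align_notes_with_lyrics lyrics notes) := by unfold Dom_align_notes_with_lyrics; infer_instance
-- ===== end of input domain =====

-- B replaces A's running note index (with its duplicated bound-check branches) by a
-- per-line arithmetic count of needed notes, one slice of the remaining notes, and
-- None padding; objective: alternative decomposition, same cost.


-- ===== PORT A =====
-- note_number_to_name: note_names[note] is guarded by 0 ≤ note < 12 (mod 12), so the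
-- pyGet? is always `some`; the `.getD ""` default is never used.
def note_number_to_name (note_number : Int) : String :=
  let note_names : List String := ["C", "C#", "D", "D#", "E", "F", "F#", "G", "G#", "A", "A#", "B"]
  let octave := PySem.Int.floordiv note_number 12 - 1
  let note := PySem.Int.mod note_number 12
  ((PySem.List.pyGet? note_names note).getD "") ++ PySem.Int.toStr octave

-- transliteration of A: fold over lines (split? with sep "\n" ≠ "" is always `some`),
-- inner fold over words, threading (accumulated output, note_index);
-- notes[note_index] under the `<` guard via pyGet? (always `some` there).
def align_notes_with_lyrics (lyrics : String) (notes : List (Int × Int)) : List (String × List (Option String)) :=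
  (((PySem.Str.split? lyrics "\n").getD []).foldl
    (fun (st : List (String × List (Option String)) × Nat) (line : String) =>
      let words := PySem.Str.split₀ line
      let inner := words.foldl
        (fun (st2 : List (Option String) × Nat) (word : String) =>
          if PySem.Str.strIsalpha word then
            (if st2.2 < notes.length then
              (st2.1 ++ [some (note_number_to_name (((PySem.List.pyGet? notes (st2.2 : Int)).getD (0, 0)).2))], st2.2 + 1)
            else
              (st2.1 ++ [none], st2.2))
          else
            (List.range word.toList.length).foldl
              (fun (st3 : List (Option String) × Nat) (_ : Nat) =>
                if st3.2 < notes.length then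
                  (st3.1 ++ [some (note_number_to_name (((PySem.List.pyGet? notes (st3.2 : Int)).getD (0, 0)).2))], st3.2 + 1)
                else
                  (st3.1 ++ [none], st3.2)) st2)
        ([], st.2)
      (st.1 ++ [(line, inner.1)], inner.2))
    ([], 0)).1

-- ===== PORT B =====
-- transliteration of Source B: fold over lines threading (output, remaining notes);
-- rem[:need] / rem[need:] with need ≥ 0 are List.take / List.drop.
def align_notes_with_lyrics_alt (lyrics : String) (notes : List (Int × Int)) : List (String × List (Option String)) :=
  (((PySem.Str.split? lyrics "\n").getD []).foldl
    (fun (st : List (String × List (Option String)) × List (Int × Int)) (line : String) =>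
      let need := ((PySem.Str.split₀ line).map
        (fun w => if PySem.Str.strIsalpha w then 1 else w.toList.length)).sum
      let used := st.2.take need
      let line_notes := used.map (fun p => some (note_number_to_name p.2))
        ++ List.replicate (need - used.length) (none : Option String)
      (st.1 ++ [(line, line_notes)], st.2.drop need))
    ([], notes)).1

-- ===== PRECONDITION & SPEC =====
def Spec_align_notes_with_lyrics (lyrics : String) (notes : List (Int × Int)) (out : List (String × List (Option String))) : Prop := out = align_notes_with_lyrics_alt lyrics notes
instance (lyrics : String) (notes : List (Int × Int)) (out : List (String × List (Option String))) : Decidable (Spec_align_notes_with_lyrics lyrics notes out) := by unfold Spec_align_notes_with_lyrics; infer_instance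

-- ===== CLAIM (what is proved, stated in full; the proofs are below) =====
def Claim_equal_align_notes_with_lyrics : Prop := ∀ (lyrics : String) (notes : List (Int × Int)), Dom_align_notes_with_lyrics lyrics notes → Spec_align_notes_with_lyrics lyrics notes (align_notes_with_lyrics lyrics notes)

-- ===== LEMMAS AND PROOFS =====

-- the duplicated one-note step of A, named for the proofs
def aStep (notes : List (Int × Int)) (st : List (Option String) × Nat) : List (Option String) × Nat :=
  if st.2 < notes.length then
    (st.1 ++ [some (note_number_to_name (((PySem.List.pyGet? notes (st.2 : Int)).getD (0, 0)).2))], st.2 + 1)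
  else
    (st.1 ++ [none], st.2)

-- A's per-line step, in terms of aStep (definitionally the lambda of the port)
def aLineStep (notes : List (Int × Int)) (st : List (String × List (Option String)) × Nat)
    (line : String) : List (String × List (Option String)) × Nat :=
  let inner := (PySem.Str.split₀ line).foldl
    (fun (st2 : List (Option String) × Nat) (word : String) =>
      if PySem.Str.strIsalpha word then aStep notes st2
      else (List.range word.toList.length).foldl (fun st3 _ => aStep notes st3) st2)
    ([], st.2)
  (st.1 ++ [(line, inner.1)], inner.2)

-- B's per-line step (definitionally the lambda of the B port)
def bLineStep (st : List (String × List (Option String)) × List (Int × Int))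
    (line : String) : List (String × List (Option String)) × List (Int × Int) :=
  let need := ((PySem.Str.split₀ line).map
    (fun w => if PySem.Str.strIsalpha w then 1 else w.toList.length)).sum
  let used := st.2.take need
  let line_notes := used.map (fun p => some (note_number_to_name p.2))
    ++ List.replicate (need - used.length) (none : Option String)
  (st.1 ++ [(line, line_notes)], st.2.drop need)

theorem portA_eq (lyrics : String) (notes : List (Int × Int)) :
    align_notes_with_lyrics lyrics notes
      = (((PySem.Str.split? lyrics "\n").getD []).foldl (aLineStep notes) ([], 0)).1 := rfl

theorem portB_eq (lyrics : String) (notes : List (Int × Int)) :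
    align_notes_with_lyrics_alt lyrics notes
      = (((PySem.Str.split? lyrics "\n").getD []).foldl bLineStep ([], notes)).1 := rfl

-- the segment of output produced by k one-note steps starting at index ni
def seg (notes : List (Int × Int)) (ni k : Nat) : List (Option String) :=
  ((notes.drop ni).take k).map (fun p => some (note_number_to_name p.2))
    ++ List.replicate (k - (notes.length - ni)) (none : Option String)

theorem seg_zero (notes : List (Int × Int)) (ni : Nat) : seg notes ni 0 = [] := by
  simp [seg]

theorem aStep_seg (notes : List (Int × Int)) (ln : List (Option String)) (ni : Nat)
    (hni : ni ≤ notes.length) :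
    aStep notes (ln, ni) = (ln ++ seg notes ni 1, min notes.length (ni + 1)) := by
  by_cases h : ni < notes.length
  · have hdrop : notes.drop ni = notes[ni] :: notes.drop (ni + 1) :=
      (List.getElem_cons_drop h).symm
    have hget : (PySem.List.pyGet? notes ((ni : Nat) : Int)).getD (0, 0) = notes[ni] := by
      rw [PySem.List.pyGet?_natCast, List.getElem?_eq_getElem h, Option.getD_some]
    have hseg : seg notes ni 1 = [some (note_number_to_name notes[ni].2)] := by
      unfold seg
      rw [hdrop, (by omega : 1 - (notes.length - ni) = 0), List.take_succ_cons,
        List.take_zero, List.replicate_zero, List.map_cons, List.map_nil, List.append_nil]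
    have hmin : min notes.length (ni + 1) = ni + 1 := by omega
    unfold aStep
    rw [if_pos (show (ln, ni).2 < notes.length from h), hseg, hmin, hget]
  · have hseg : seg notes ni 1 = [none] := by
      unfold seg
      rw [List.drop_eq_nil_of_le (by omega), (by omega : 1 - (notes.length - ni) = 1),
        List.take_nil, List.map_nil, List.replicate_one, List.nil_append]
    have hmin : min notes.length (ni + 1) = notes.length := by omega
    unfold aStep
    rw [if_neg (show ¬ (ln, ni).2 < notes.length from h), hseg, hmin,
      (by omega : ni = notes.length)]

theorem seg_add (notes : List (Int × Int)) (ni k1 k2 : Nat) :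
    seg notes ni (k1 + k2) = seg notes ni k1 ++ seg notes (min notes.length (ni + k1)) k2 := by
  by_cases h : ni + k1 ≤ notes.length
  · have hmin : min notes.length (ni + k1) = ni + k1 := Nat.min_eq_right h
    have hrep1 : k1 - (notes.length - ni) = 0 := by omega
    have hrep : k1 + k2 - (notes.length - ni) = k2 - (notes.length - (ni + k1)) := by omega
    have hdd : (notes.drop ni).drop k1 = notes.drop (ni + k1) := by
      rw [List.drop_drop, Nat.add_comm]
    unfold seg
    rw [hmin, hrep1, hrep, List.take_add, List.map_append, ← hdd]
    simp
  · have hmin : min notes.length (ni + k1) = notes.length := Nat.min_eq_left (by omega)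
    have hlen : (notes.drop ni).length ≤ k1 := by
      rw [List.length_drop]; omega
    have h1 : (notes.drop ni).take k1 = notes.drop ni := List.take_of_length_le hlen
    have h2 : (notes.drop ni).take (k1 + k2) = notes.drop ni :=
      List.take_of_length_le (by omega)
    have hrep : k1 + k2 - (notes.length - ni) = (k1 - (notes.length - ni)) + k2 := by omega
    unfold seg
    rw [hmin, h1, h2, List.drop_length, hrep, List.replicate_add]
    simp

theorem range_fold_seg (notes : List (Int × Int)) (k : Nat) (ln : List (Option String)) (ni : Nat)
    (hni : ni ≤ notes.length) :
    (List.range k).foldl (fun st _ => aStep notes st) (ln, ni)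
      = (ln ++ seg notes ni k, min notes.length (ni + k)) := by
  induction k generalizing ln ni with
  | zero =>
      simp [seg_zero]
      exact hni
  | succ k ih =>
      rw [List.range_succ, List.foldl_append, ih ln ni hni]
      simp only [List.foldl_cons, List.foldl_nil]
      rw [aStep_seg notes _ _ (by omega), List.append_assoc, ← seg_add]
      have hm : min notes.length (min notes.length (ni + k) + 1)
          = min notes.length (ni + (k + 1)) := by omega
      rw [hm]

def cnt (w : String) : Nat := if PySem.Str.strIsalpha w then 1 else w.toList.length

theorem words_fold_seg (notes : List (Int × Int)) (ws : List String)
    (ln : List (Option String)) (ni : Nat) (hni : ni ≤ notes.length) :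
    ws.foldl
      (fun (st2 : List (Option String) × Nat) (word : String) =>
        if PySem.Str.strIsalpha word then aStep notes st2
        else (List.range word.toList.length).foldl (fun st3 _ => aStep notes st3) st2)
      (ln, ni)
      = (ln ++ seg notes ni ((ws.map cnt).sum), min notes.length (ni + (ws.map cnt).sum)) := by
  induction ws generalizing ln ni with
  | nil =>
      simp [seg_zero]
      exact hni
  | cons w ws ih =>
      have hstep : (if PySem.Str.strIsalpha w then aStep notes (ln, ni)
          else (List.range w.toList.length).foldl (fun st3 _ => aStep notes st3) (ln, ni))
          = (ln ++ seg notes ni (cnt w), min notes.length (ni + cnt w)) := by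
        by_cases h : PySem.Str.strIsalpha w
        · rw [if_pos h]
          have : cnt w = 1 := by unfold cnt; rw [if_pos h]
          rw [this, aStep_seg notes ln ni hni]
        · rw [if_neg h]
          have : cnt w = w.toList.length := by unfold cnt; rw [if_neg h]
          rw [this, range_fold_seg notes _ ln ni hni]
      rw [List.foldl_cons, hstep, ih _ _ (by omega)]
      rw [List.append_assoc, ← seg_add]
      have hm : min notes.length (min notes.length (ni + cnt w) + (ws.map cnt).sum)
          = min notes.length (ni + ((w :: ws).map cnt).sum) := by
        simp only [List.map_cons, List.sum_cons]; omega
      rw [hm]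
      simp

theorem bLineStep_eq (notes : List (Int × Int)) (acc : List (String × List (Option String)))
    (ni : Nat) (line : String) :
    bLineStep (acc, notes.drop ni) line
      = (acc ++ [(line, seg notes ni ((PySem.Str.split₀ line).map cnt).sum)],
         notes.drop (min notes.length (ni + ((PySem.Str.split₀ line).map cnt).sum))) := by
  set S := ((PySem.Str.split₀ line).map cnt).sum with hS
  have hneed : ((PySem.Str.split₀ line).map
      (fun w => if PySem.Str.strIsalpha w then 1 else w.toList.length)).sum = S := rfl
  have hpad : S - ((notes.drop ni).take S).length = S - (notes.length - ni) := by
    rw [List.length_take, List.length_drop]; omega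
  have hdrop : (notes.drop ni).drop S = notes.drop (min notes.length (ni + S)) := by
    rw [List.drop_drop]
    by_cases h : ni + S ≤ notes.length
    · rw [Nat.min_eq_right h, Nat.add_comm]
    · rw [Nat.min_eq_left (show notes.length ≤ ni + S by omega), List.drop_length]
      exact List.drop_eq_nil_of_le (by omega)
  show (acc ++ [(line, ((notes.drop ni).take S).map (fun p => some (note_number_to_name p.2))
      ++ List.replicate (S - ((notes.drop ni).take S).length) none)], (notes.drop ni).drop S) = _
  rw [hpad, hdrop, seg]

theorem lines_fold_eq (notes : List (Int × Int)) (lines : List String)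
    (acc : List (String × List (Option String))) (ni : Nat) (hni : ni ≤ notes.length) :
    (lines.foldl bLineStep (acc, notes.drop ni)).1
      = (lines.foldl (aLineStep notes) (acc, ni)).1 := by
  induction lines generalizing acc ni with
  | nil => rfl
  | cons line lines ih =>
      rw [List.foldl_cons, List.foldl_cons, bLineStep_eq notes acc ni line]
      have ha : aLineStep notes (acc, ni) line
          = (acc ++ [(line, seg notes ni ((PySem.Str.split₀ line).map cnt).sum)],
             min notes.length (ni + ((PySem.Str.split₀ line).map cnt).sum)) := by
        unfold aLineStep
        rw [words_fold_seg notes _ [] ni hni]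
        simp
      rw [ha]
      exact ih _ _ (by omega)

-- ===== VERDICT (by name: the statement is the Claim_ definition above) =====
theorem align_notes_with_lyrics_spec : Claim_equal_align_notes_with_lyrics := by
  intro lyrics notes _
  show align_notes_with_lyrics lyrics notes = align_notes_with_lyrics_alt lyrics notes
  rw [portA_eq, portB_eq]
  have h := lines_fold_eq notes ((PySem.Str.split? lyrics "\n").getD []) [] 0 (by omega)
  rw [List.drop_zero] at h
  exact h.symm
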